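-- pv_equiv track=rewrite | github.com/Abubakkar13/Competitive-Programming-Codes | Codechef August Challenge 2020/SKMP.PY | check
-- ===== SOURCE A (Python) =====
-- def check(s):
--     z = s[0]
--     for i in s:
--         if(i!=z):
--             break
--     if(i>z):
--         return 1
--     else:
--         return 0
-- ===== SOURCE B (Python) =====
-- def check(s):
--     z = s[0]
--     return 1 if s > [z] * len(s) else 0
-- ===== Notes on version B (the rewrite author's own statement) =====
-- stated objective: simpler
-- what changed: The explicit for-loop with a break is replaced by one closed-form lexicographic comparison of the input list against a constant list of its first element repeated to the same length.
import Mathlib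
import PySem

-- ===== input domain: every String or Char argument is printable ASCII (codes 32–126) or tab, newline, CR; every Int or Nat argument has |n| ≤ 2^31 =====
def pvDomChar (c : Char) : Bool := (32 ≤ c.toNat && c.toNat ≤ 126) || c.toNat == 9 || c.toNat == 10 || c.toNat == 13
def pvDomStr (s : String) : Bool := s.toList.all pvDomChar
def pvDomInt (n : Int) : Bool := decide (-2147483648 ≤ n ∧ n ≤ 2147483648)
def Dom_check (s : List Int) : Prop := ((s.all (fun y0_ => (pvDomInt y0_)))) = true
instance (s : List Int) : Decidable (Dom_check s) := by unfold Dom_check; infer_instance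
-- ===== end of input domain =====

-- B replaces A's explicit scan by one closed-form lexicographic comparison of s with [s[0]]*len(s) (simpler).


-- ===== PORT A =====
-- the for-loop: i takes each element, break at the first i ≠ z; afterwards i is
-- the first differing element, or the last element when all are equal
def checkLoop (z : Int) : List Int → Int
  | [] => z          -- unreachable under Pre_check (s ≠ [])
  | [x] => x
  | x :: y :: rest => if x ≠ z then x else checkLoop z (y :: rest)

def check (s : List Int) : Int :=
  match PySem.List.pyGet? s 0 with
  | none => 0        -- IndexError in Python; excluded by Pre_check
  | some z => if checkLoop z s > z then 1 else 0

-- ===== PORT B =====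
-- Python's '>' on lists: lexicographic comparison, ported step for step
def pyListGt : List Int → List Int → Bool
  | [], [] => false
  | [], _ :: _ => false
  | _ :: _, [] => true
  | a :: as_, b :: bs => if a > b then true else if a < b then false else pyListGt as_ bs

def check_alt (s : List Int) : Int :=
  match PySem.List.pyGet? s 0 with
  | none => 0        -- IndexError in Python; excluded by Pre_check
  | some z => if pyListGt s (List.replicate s.length z) then 1 else 0

-- ===== PRECONDITION & SPEC =====
-- A (and B) raise IndexError on the empty list (s[0]); only those inputs are excluded.
def Pre_check (s : List Int) : Prop := s ≠ []
instance (s : List Int) : Decidable (Pre_check s) := by unfold Pre_check; infer_instance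
def pvWitness_check : List Int := [1, 2]
def Spec_check (s : List Int) (out : Int) : Prop := out = check_alt s
instance (s : List Int) (out : Int) : Decidable (Spec_check s out) := by unfold Spec_check; infer_instance

-- ===== CLAIM (what is proved, stated in full; the proofs are below) =====
def Claim_equal_check : Prop := ∀ (s : List Int), Dom_check s → Pre_check s → Spec_check s (check s)

-- ===== LEMMAS AND PROOFS =====
theorem pyListGt_single (x z : Int) : pyListGt [x] [z] = decide (x > z) := by
  rcases lt_trichotomy x z with h | h | h
  · simp [pyListGt, h, not_lt.mpr (le_of_lt h)]
  · simp [pyListGt, h]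
  · simp [pyListGt, h]

theorem loop_eq_lex (z : Int) (t : List Int) (h : t ≠ []) :
    (decide (checkLoop z t > z)) = pyListGt t (List.replicate t.length z) := by
  induction t with
  | nil => exact absurd rfl h
  | cons x rest ih =>
    cases rest with
    | nil =>
      simp only [checkLoop, List.length_singleton, List.replicate_one, pyListGt_single]
      rfl
    | cons y r =>
      by_cases hx : x = z
      · subst hx
        have hl : pyListGt (x :: y :: r) (List.replicate (x :: y :: r).length x)
            = pyListGt (y :: r) (List.replicate (y :: r).length x) := by
          simp [pyListGt, List.replicate_succ]
        have hc : checkLoop x (x :: y :: r) = checkLoop x (y :: r) := by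
          simp [checkLoop]
        rw [hl, hc]
        exact ih (by simp)
      · have hc : checkLoop z (x :: y :: r) = x := by simp [checkLoop, hx]
        rw [hc]
        have hlex : pyListGt (x :: y :: r) (List.replicate (x :: y :: r).length z)
            = decide (x > z) := by
          rcases lt_trichotomy x z with hl | hl | hl
          · simp [pyListGt, List.replicate_succ, hl, not_lt.mpr (le_of_lt hl)]
          · exact absurd hl hx
          · simp [pyListGt, List.replicate_succ, hl]
        rw [hlex]

-- ===== VERDICT (by name: the statement is the Claim_ definition above) =====
theorem check_spec : Claim_equal_check := by
  intro s _ hpre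
  unfold Spec_check check check_alt
  cases s with
  | nil => exact absurd rfl hpre
  | cons z rest =>
    have h0 : PySem.List.pyGet? (z :: rest) 0 = some z := by
      simp [PySem.List.pyGet?, PySem.List.pyIdx?]
    rw [h0]
    have := loop_eq_lex z (z :: rest) (by simp)
    by_cases h : checkLoop z (z :: rest) > z
    · simp [h] at this ⊢; rw [← this]
    · simp [h] at this ⊢; rw [← this]
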